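-- pv_equiv track=rewrite | github.com/alcohol-study/2024-programmers | programmers/algorithm_category/unanchoi/bfsdfs/퍼즐맞추기.py | spining_set
-- ===== SOURCE A (Python) =====
-- def spining_set(original):
--     spin_90 = set()
--     spin_180 = set()
--     spin_270 = set()
--     while original:
--         x, y = original.pop()
--         spin_90.add((y, -x))
--         spin_180.add((-x, -y))
--         spin_270.add((-y, x))
--     return spin_90, spin_180, spin_270
-- ===== SOURCE B (Python) =====
-- def spining_set(original):
--     # Build spin_90 by draining `original` (same mutation as A: it ends up empty),
--     # then derive each further set by rotating the previous set 90 degrees again.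
--     def r(p):
--         return (p[1], -p[0])
--     spin_90 = set()
--     while original:
--         spin_90.add(r(original.pop()))
--     spin_180 = {r(p) for p in spin_90}
--     spin_270 = {r(p) for p in spin_180}
--     return spin_90, spin_180, spin_270
-- ===== Notes on version B (the rewrite author's own statement) =====
-- stated objective: alternative
-- what changed: A computes all three rotations of each point in one combined drain loop; B drains the input once to build spin_90 and then derives spin_180 and spin_270 by re-applying the single 90-degree rotation r(a,b)=(b,-a) to the previous set, one pass each.
import Mathlib
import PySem

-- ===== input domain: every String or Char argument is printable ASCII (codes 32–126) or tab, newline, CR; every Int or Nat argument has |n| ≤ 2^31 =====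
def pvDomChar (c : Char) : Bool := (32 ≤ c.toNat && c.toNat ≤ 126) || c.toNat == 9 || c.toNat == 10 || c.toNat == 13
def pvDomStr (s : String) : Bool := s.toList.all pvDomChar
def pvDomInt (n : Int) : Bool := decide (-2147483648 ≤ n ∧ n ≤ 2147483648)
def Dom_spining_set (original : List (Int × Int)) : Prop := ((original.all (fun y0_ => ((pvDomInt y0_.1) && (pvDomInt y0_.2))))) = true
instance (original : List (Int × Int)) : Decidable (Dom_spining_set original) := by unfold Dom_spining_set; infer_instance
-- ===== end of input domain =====

-- B derives spin_180 and spin_270 by chaining the 90-degree rotation over the previous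
-- set instead of A's single combined drain loop (alternative decomposition, same cost).
-- Both Pythons empty the `original` list in place; the equivalence is about the return value.

-- ===== PORT A =====
-- A's `while original: x, y = original.pop()` consumes the list back-to-front,
-- adding all three rotations of each point into three sets in one loop.
def spining_set (original : List (Int × Int)) : (List (Int × Int)) × (List (Int × Int)) × (List (Int × Int)) :=
  original.reverse.foldl
    (fun acc p =>
      (PySem.Set.add acc.1 (p.2, -p.1),
       PySem.Set.add acc.2.1 (-p.1, -p.2),
       PySem.Set.add acc.2.2 (-p.2, p.1)))
    ([], [], [])

-- ===== PORT B =====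
def pvRot (p : Int × Int) : Int × Int := (p.2, -p.1)

-- one pass: fold the rotated elements of a list into a fresh set
def pvSpinOf (l : List (Int × Int)) : List (Int × Int) :=
  l.foldl (fun s p => PySem.Set.add s (pvRot p)) []

def spining_set_alt (original : List (Int × Int)) : (List (Int × Int)) × (List (Int × Int)) × (List (Int × Int)) :=
  let spin90 := pvSpinOf original.reverse   -- drain loop: pop from the back, add r(p)
  let spin180 := pvSpinOf spin90            -- {r(p) for p in spin_90}
  let spin270 := pvSpinOf spin180           -- {r(p) for p in spin_180}
  (spin90, spin180, spin270)

-- ===== PRECONDITION & SPEC =====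
def Spec_spining_set (original : List (Int × Int)) (out : (List (Int × Int)) × (List (Int × Int)) × (List (Int × Int))) : Prop := out = spining_set_alt original
instance (original : List (Int × Int)) (out : (List (Int × Int)) × (List (Int × Int)) × (List (Int × Int))) : Decidable (Spec_spining_set original out) := by unfold Spec_spining_set; infer_instance

-- ===== CLAIM (what is proved, stated in full; the proofs are below) =====
def Claim_equal_spining_set : Prop := ∀ (original : List (Int × Int)), Dom_spining_set original → Spec_spining_set original (spining_set original)

-- ===== LEMMAS AND PROOFS =====

theorem pvRot_injective : Function.Injective pvRot := by
  intro p q h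
  simp only [pvRot, Prod.mk.injEq] at h
  exact Prod.ext (by omega) h.1

theorem pvSpinOf_eq_ofList (l : List (Int × Int)) :
    pvSpinOf l = PySem.Set.ofList (l.map pvRot) := by
  simp [pvSpinOf, PySem.Set.ofList_eq_foldl, List.foldl_map]

theorem map_set_add {α β : Type} [BEq α] [LawfulBEq α] [BEq β] [LawfulBEq β] (f : α → β)
    (hf : Function.Injective f) (s : List α) (x : α) :
    (PySem.Set.add s x).map f = PySem.Set.add (s.map f) (f x) := by
  rw [PySem.Set.add_eq_ite, PySem.Set.add_eq_ite]
  by_cases hx : x ∈ s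
  · simp [hx, List.mem_map.mpr ⟨x, hx, rfl⟩]
  · have : f x ∉ s.map f := by
      intro h
      obtain ⟨y, hy, hxy⟩ := List.mem_map.mp h
      exact hx (hf hxy ▸ hy)
    simp [hx, this]

theorem map_foldl_add {α β : Type} [BEq α] [LawfulBEq α] [BEq β] [LawfulBEq β] (f : α → β)
    (hf : Function.Injective f) (l : List α) :
    ∀ s : List α, (l.foldl PySem.Set.add s).map f = (l.map f).foldl PySem.Set.add (s.map f) := by
  induction l with
  | nil => intro s; rfl
  | cons x l ih =>
    intro s
    simp only [List.foldl_cons, List.map_cons]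
    rw [ih, map_set_add f hf]

theorem map_ofList {α β : Type} [BEq α] [LawfulBEq α] [BEq β] [LawfulBEq β] (f : α → β)
    (hf : Function.Injective f) (l : List α) :
    (PySem.Set.ofList l).map f = PySem.Set.ofList (l.map f) := by
  rw [PySem.Set.ofList_eq_foldl, PySem.Set.ofList_eq_foldl]
  simpa using map_foldl_add f hf l []

theorem pvSpinOf_ofList (l : List (Int × Int)) :
    pvSpinOf (PySem.Set.ofList l) = PySem.Set.ofList (l.map pvRot) := by
  rw [pvSpinOf_eq_ofList, map_ofList pvRot pvRot_injective, PySem.Set.ofList_ofList]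

-- ===== VERDICT (by name: the statement is the Claim_ definition above) =====
theorem spining_set_spec : Claim_equal_spining_set := by
  intro original _
  unfold Spec_spining_set spining_set spining_set_alt
  rw [PySem.List.foldl_prod_mk
        (f := fun s (p : Int × Int) => PySem.Set.add s (p.2, -p.1))
        (g := fun (s : List (Int × Int) × List (Int × Int)) (p : Int × Int) =>
          (PySem.Set.add s.1 (-p.1, -p.2), PySem.Set.add s.2 (-p.2, p.1)))]
  rw [PySem.List.foldl_prod_mk
        (f := fun s (p : Int × Int) => PySem.Set.add s (-p.1, -p.2))
        (g := fun s (p : Int × Int) => PySem.Set.add s (-p.2, p.1))]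
  have h90 : original.reverse.foldl (fun s (p : Int × Int) => PySem.Set.add s (p.2, -p.1)) [] =
      pvSpinOf original.reverse := rfl
  have e1 : pvSpinOf original.reverse = PySem.Set.ofList (original.reverse.map pvRot) :=
    pvSpinOf_eq_ofList _
  have h180 : original.reverse.foldl (fun s (p : Int × Int) => PySem.Set.add s (-p.1, -p.2)) [] =
      pvSpinOf (pvSpinOf original.reverse) := by
    rw [e1, pvSpinOf_ofList, List.map_map, PySem.Set.ofList_eq_foldl, List.foldl_map]
    simp [pvRot]
  have h270 : original.reverse.foldl (fun s (p : Int × Int) => PySem.Set.add s (-p.2, p.1)) [] =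
      pvSpinOf (pvSpinOf (pvSpinOf original.reverse)) := by
    rw [e1, pvSpinOf_ofList, List.map_map, pvSpinOf_ofList, List.map_map,
      PySem.Set.ofList_eq_foldl, List.foldl_map]
    simp [pvRot]
  rw [h90, h180, h270]
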